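-- pv_equiv track=rewrite | github.com/Beyondthemountain/RoboMermaid | scripts/generate_diagrams.py | expand_directional
-- ===== SOURCE A (Python) =====
-- from collections import defaultdict, deque
-- from typing import Any, Dict, List, Set, Tuple
--
-- def expand_directional(
--     seed: Set[str],
--     out_adj: Dict[str, Set[str]],
--     in_adj: Dict[str, Set[str]],
--     outbound: int = 0,
--     inbound: int = 0,
-- ) -> Set[str]:
--     seen = set(seed)
--
--     def walk(adj: Dict[str, Set[str]], depth: int) -> None:
--         if depth <= 0:
--             return
--         q = deque([(n, 0) for n in seed])
--         while q:
--             n, d = q.popleft()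
--             if d == depth:
--                 continue
--             for nb in adj.get(n, set()):
--                 if nb not in seen:
--                     seen.add(nb)
--                     q.append((nb, d + 1))
--
--     walk(out_adj, outbound)
--     walk(in_adj, inbound)
--     return seen
-- ===== SOURCE B (Python) =====
-- def expand_directional(seed, out_adj, in_adj, outbound=0, inbound=0):
--     seen = set(seed)
--
--     def walk(adj, depth):
--         # worklist-free fixpoint iteration: a round-stamped discovery dict,
--         # rescanned in full each round; only entries stamped with the current
--         # round fire their outgoing edges.
--         level = {n: 0 for n in seed}
--         r = 0
--         while r < depth:
--             added = False
--             for n, d in list(level.items()):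
--                 if d == r:
--                     for nb in adj.get(n, ()):
--                         if nb not in seen:
--                             seen.add(nb)
--                             level[nb] = r + 1
--                             added = True
--             if not added:
--                 break
--             r += 1
--
--     walk(out_adj, outbound)
--     walk(in_adj, inbound)
--     return seen
-- ===== Notes on version B (the rewrite author's own statement) =====
-- stated objective: alternative
-- what changed: Eliminates the BFS worklist entirely: instead of a FIFO queue of (node, depth) pairs, B keeps a round-stamped discovery dict and does semi-naive fixpoint iteration — each round rescans the whole dict and fires the out-edges of exactly the entries stamped with the current round, stopping when a round adds nothing.
import Mathlib
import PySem

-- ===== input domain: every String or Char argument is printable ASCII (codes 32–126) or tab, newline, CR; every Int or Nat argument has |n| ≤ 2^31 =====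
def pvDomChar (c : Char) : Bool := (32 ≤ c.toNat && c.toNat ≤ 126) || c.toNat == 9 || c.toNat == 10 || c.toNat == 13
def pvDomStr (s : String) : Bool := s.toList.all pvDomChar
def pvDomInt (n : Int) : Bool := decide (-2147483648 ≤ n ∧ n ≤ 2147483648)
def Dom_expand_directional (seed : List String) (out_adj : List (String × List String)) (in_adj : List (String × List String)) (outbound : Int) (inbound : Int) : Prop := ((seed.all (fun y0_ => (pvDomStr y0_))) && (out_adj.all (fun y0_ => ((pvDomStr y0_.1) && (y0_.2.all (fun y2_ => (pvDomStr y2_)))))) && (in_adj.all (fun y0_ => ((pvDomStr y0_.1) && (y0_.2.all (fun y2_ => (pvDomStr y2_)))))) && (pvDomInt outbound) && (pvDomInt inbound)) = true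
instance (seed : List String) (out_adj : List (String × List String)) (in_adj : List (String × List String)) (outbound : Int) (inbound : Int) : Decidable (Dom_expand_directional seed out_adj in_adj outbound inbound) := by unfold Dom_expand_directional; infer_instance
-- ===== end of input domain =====

-- B replaces A's FIFO-queue BFS by worklist-free round-based fixpoint iteration over a
-- round-stamped discovery dict (alternative decomposition; not claimed faster).

-- ===== PORT A =====
-- inner 'for nb in adj.get(n, set())' loop of A's walk: extends seen and appends (nb, d+1) to the queue
def pvNbEnqueue (seen : PySem.Set String) (q : List (String × Int)) (nbs : List String) (d : Int) :
    PySem.Set String × List (String × Int) :=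
  nbs.foldl (fun p nb =>
    if PySem.Set.contains p.1 nb then p else (PySem.Set.add p.1 nb, p.2 ++ [(nb, d + 1)])) (seen, q)

-- A's 'while q' loop; fuel (a provably sufficient bound, supplied by the caller) only makes the recursion structural
def pvWalkA (adj : List (String × List String)) (depth : Int) (fuel : Nat)
    (seen : PySem.Set String) (q : List (String × Int)) : PySem.Set String :=
  match q, fuel with
  | [], _ => seen
  | _ :: _, 0 => seen
  | (n, d) :: rest, fuel' + 1 =>
    if d == depth then
      pvWalkA adj depth fuel' seen rest
    else
      let r := pvNbEnqueue seen rest ((PySem.Dict.mk adj).getD n []) d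
      pvWalkA adj depth fuel' r.1 r.2

-- A's walk(adj, depth): early return for depth <= 0, else the queue loop seeded with [(n, 0) for n in seed]
def pvWalkTopA (adj : List (String × List String)) (depth : Int) (seed : List String)
    (seen : PySem.Set String) : PySem.Set String :=
  if depth ≤ 0 then seen
  else pvWalkA adj depth (seed.length + (adj.map (fun p => p.2.length)).sum) seen
        ((PySem.Set.ofList seed).map (fun n => (n, (0 : Int))))

def expand_directional (seed : List String) (out_adj : List (String × List String)) (in_adj : List (String × List String)) (outbound : Int) (inbound : Int) : List String :=
  let seen := PySem.Set.ofList seed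
  let seen1 := pvWalkTopA out_adj outbound seed seen
  pvWalkTopA in_adj inbound seed seen1

-- ===== PORT B =====
-- 'if nb not in seen: seen.add(nb); level[nb] = r + 1; added = True'
def pvFire (r : Int) (st : PySem.Set String × PySem.Dict String Int × Bool) (nb : String) :
    PySem.Set String × PySem.Dict String Int × Bool :=
  if PySem.Set.contains st.1 nb then st
  else (PySem.Set.add st.1 nb, st.2.1.insert nb (r + 1), true)

-- one snapshot entry (n, d): fire its edges only when d == r
def pvRoundStep (adj : List (String × List String)) (r : Int)
    (st : PySem.Set String × PySem.Dict String Int × Bool) (p : String × Int) :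
    PySem.Set String × PySem.Dict String Int × Bool :=
  if p.2 == r then ((PySem.Dict.mk adj).getD p.1 []).foldl (pvFire r) st else st

-- one round: B's 'for n, d in list(level.items())' over the snapshot taken at round start
def pvRoundC (adj : List (String × List String)) (r : Int) (seen : PySem.Set String)
    (level : PySem.Dict String Int) : PySem.Set String × PySem.Dict String Int × Bool :=
  level.items.foldl (pvRoundStep adj r) (seen, level, false)

-- B's 'while r < depth' loop with the 'if not added: break' exit; fuel = number of remaining
-- rounds (the caller passes depth.toNat, which provably suffices since r rises by 1 per round)
def pvWalkCAux (adj : List (String × List String)) (depth : Int) :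
    Nat → Int → PySem.Set String → PySem.Dict String Int → PySem.Set String
  | 0, _, seen, _ => seen
  | fuel + 1, r, seen, level =>
    if r < depth then
      let st := pvRoundC adj r seen level
      if st.2.2 then pvWalkCAux adj depth fuel (r + 1) st.1 st.2.1 else st.1
    else seen

-- '{n: 0 for n in seed}'
def pvSeedLevel (seed : List String) : PySem.Dict String Int :=
  seed.foldl (fun d n => d.insert n 0) PySem.Dict.empty

def expand_directional_alt (seed : List String) (out_adj : List (String × List String)) (in_adj : List (String × List String)) (outbound : Int) (inbound : Int) : List String :=
  let seen := PySem.Set.ofList seed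
  let seen1 := pvWalkCAux out_adj outbound outbound.toNat 0 seen (pvSeedLevel seed)
  pvWalkCAux in_adj inbound inbound.toNat 0 seen1 (pvSeedLevel seed)

-- ===== PRECONDITION & SPEC =====
def Spec_expand_directional (seed : List String) (out_adj : List (String × List String)) (in_adj : List (String × List String)) (outbound : Int) (inbound : Int) (out : List String) : Prop := out = expand_directional_alt seed out_adj in_adj outbound inbound
instance (seed : List String) (out_adj : List (String × List String)) (in_adj : List (String × List String)) (outbound : Int) (inbound : Int) (out : List String) : Decidable (Spec_expand_directional seed out_adj in_adj outbound inbound out) := by unfold Spec_expand_directional; infer_instance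

-- ===== CLAIM (what is proved, stated in full; the proofs are below) =====
def Claim_equal_expand_directional : Prop := ∀ (seed : List String) (out_adj : List (String × List String)) (in_adj : List (String × List String)) (outbound : Int) (inbound : Int), Dom_expand_directional seed out_adj in_adj outbound inbound → Spec_expand_directional seed out_adj in_adj outbound inbound (expand_directional seed out_adj in_adj outbound inbound)

-- ===== LEMMAS AND PROOFS =====

-- level-synchronous frontier BFS: the common reference both ports are reduced to
def pvVisit (p : PySem.Set String × List String) (nb : String) : PySem.Set String × List String :=
  if PySem.Set.contains p.1 nb then p else (PySem.Set.add p.1 nb, p.2 ++ [nb])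

def pvExpandNode (adj : List (String × List String)) (p : PySem.Set String × List String)
    (n : String) : PySem.Set String × List String :=
  ((PySem.Dict.mk adj).getD n []).foldl pvVisit p

def pvWalkB (adj : List (String × List String)) (fuel : Nat) (seen : PySem.Set String)
    (frontier : List String) : PySem.Set String :=
  if frontier.isEmpty then seen
  else
    match fuel with
    | 0 => seen
    | k + 1 =>
      let r := frontier.foldl (pvExpandNode adj) (seen, [])
      pvWalkB adj k r.1 r.2

-- distinct adjacency values not yet seen: an upper bound on how many nodes a walk can still discover
def pvPot (adj : List (String × List String)) (seen : PySem.Set String) : Nat :=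
  ((adj.flatMap (fun p => p.2)).toFinset \ seen.toFinset).card

-- accumulator lemma for the inner neighbour fold
theorem pv_acc_nb (nbs : List String) (seen : PySem.Set String) (out : List String) :
    nbs.foldl pvVisit (seen, out)
      = ((nbs.foldl pvVisit (seen, [])).1, out ++ (nbs.foldl pvVisit (seen, [])).2) := by
  induction nbs generalizing seen out with
  | nil => simp
  | cons nb rest ih =>
    simp only [List.foldl_cons, pvVisit]
    by_cases h : nb ∈ seen
    · simp only [h, if_pos, PySem.Set.contains, List.contains_iff_mem]
      exact ih seen out
    · simp only [PySem.Set.contains, List.contains_iff_mem, h, ite_false, List.nil_append]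
      rw [ih (PySem.Set.add seen nb) (out ++ [nb]), ih (PySem.Set.add seen nb) [nb]]
      simp

-- accumulator lemma for the frontier fold
theorem pv_acc_level (adj : List (String × List String)) (F : List String)
    (seen : PySem.Set String) (out : List String) :
    F.foldl (pvExpandNode adj) (seen, out)
      = ((F.foldl (pvExpandNode adj) (seen, [])).1,
         out ++ (F.foldl (pvExpandNode adj) (seen, [])).2) := by
  induction F generalizing seen out with
  | nil => simp
  | cons n rest ih =>
    simp only [List.foldl_cons]
    rw [show pvExpandNode adj (seen, out) n
          = ((pvExpandNode adj (seen, []) n).1, out ++ (pvExpandNode adj (seen, []) n).2) from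
        pv_acc_nb _ _ _]
    rw [ih (pvExpandNode adj (seen, []) n).1 (out ++ (pvExpandNode adj (seen, []) n).2)]
    rw [ih (pvExpandNode adj (seen, []) n).1 (pvExpandNode adj (seen, []) n).2]
    simp

-- A's enqueueing fold is the pvVisit fold with depth tags d+1 appended to the queue
theorem pv_visit_cons (nb : String) (rest : List String) (seen : PySem.Set String)
    (out : List String) :
    List.foldl pvVisit (seen, out) (nb :: rest)
      = if nb ∈ seen then List.foldl pvVisit (seen, out) rest
        else List.foldl pvVisit (PySem.Set.add seen nb, out ++ [nb]) rest := by
  by_cases h : nb ∈ seen <;>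
    simp [pvVisit, PySem.Set.contains, h]

theorem pv_enq_cons (nb : String) (rest : List String) (seen : PySem.Set String)
    (q : List (String × Int)) (d : Int) :
    pvNbEnqueue seen q (nb :: rest) d
      = if nb ∈ seen then pvNbEnqueue seen q rest d
        else pvNbEnqueue (PySem.Set.add seen nb) (q ++ [(nb, d + 1)]) rest d := by
  by_cases h : nb ∈ seen <;>
    simp [pvNbEnqueue, PySem.Set.contains, h]

theorem pv_enq_eq (nbs : List String) (seen : PySem.Set String) (q : List (String × Int)) (d : Int) :
    pvNbEnqueue seen q nbs d
      = ((nbs.foldl pvVisit (seen, [])).1,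
         q ++ (nbs.foldl pvVisit (seen, [])).2.map (fun s => (s, d + 1))) := by
  induction nbs generalizing seen q with
  | nil => simp [pvNbEnqueue]
  | cons nb rest ih =>
    rw [pv_enq_cons, pv_visit_cons]
    by_cases h : nb ∈ seen
    · rw [if_pos h, if_pos h]
      exact ih seen q
    · rw [if_neg h, if_neg h, List.nil_append]
      rw [ih (PySem.Set.add seen nb) (q ++ [(nb, d + 1)])]
      rw [pv_acc_nb rest (PySem.Set.add seen nb) [nb]]
      simp

-- every neighbour delivered by adj.get(n, set()) occurs among adj's values
theorem pv_nbs_sub (adj : List (String × List String)) (n x : String)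
    (hx : x ∈ (PySem.Dict.mk adj).getD n []) : x ∈ adj.flatMap (fun p => p.2) := by
  simp only [PySem.Dict.getD, PySem.Dict.get?] at hx
  cases hfind : List.find? (fun p => p.1 == n) (PySem.Dict.mk adj).items with
  | none => rw [hfind] at hx; simp at hx
  | some p =>
    rw [hfind] at hx
    simp only [Option.map_some, Option.getD_some] at hx
    have hp : p ∈ adj := List.mem_of_find?_eq_some hfind
    exact List.mem_flatMap.mpr ⟨p, hp, hx⟩

-- each discovered node spends one unit of potential
theorem pv_pot_nb (adj : List (String × List String)) (nbs : List String)
    (seen : PySem.Set String) (hsub : ∀ x ∈ nbs, x ∈ adj.flatMap (fun p => p.2)) :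
    (nbs.foldl pvVisit (seen, [])).2.length + pvPot adj (nbs.foldl pvVisit (seen, [])).1
      ≤ pvPot adj seen := by
  induction nbs generalizing seen with
  | nil => simp
  | cons nb rest ih =>
    simp only [List.foldl_cons, pvVisit]
    by_cases h : nb ∈ seen
    · simp only [PySem.Set.contains, List.contains_iff_mem, h, if_pos]
      exact ih seen (fun x hx => hsub x (List.mem_cons_of_mem _ hx))
    · simp only [PySem.Set.contains, List.contains_iff_mem, h, ite_false, List.nil_append]
      rw [pv_acc_nb rest (PySem.Set.add seen nb) [nb]]
      have ih' := ih (PySem.Set.add seen nb) (fun x hx => hsub x (List.mem_cons_of_mem _ hx))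
      have hmemV : nb ∈ (adj.flatMap (fun p => p.2)).toFinset :=
        List.mem_toFinset.mpr (hsub nb (List.mem_cons_self))
      have hnot : nb ∉ seen.toFinset := fun hc => h (List.mem_toFinset.mp hc)
      have hadd : (PySem.Set.add seen nb).toFinset = insert nb seen.toFinset := by
        simp only [PySem.Set.add, PySem.Set.contains, List.contains_iff_mem, h, ite_false]
        simp [List.toFinset_append]
      have hdrop : pvPot adj (PySem.Set.add seen nb) + 1 = pvPot adj seen := by
        unfold pvPot
        rw [hadd, Finset.sdiff_insert]
        have hmemD : nb ∈ (adj.flatMap (fun p => p.2)).toFinset \ seen.toFinset :=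
          Finset.mem_sdiff.mpr ⟨hmemV, hnot⟩
        rw [Finset.card_erase_of_mem hmemD]
        have : 0 < ((adj.flatMap (fun p => p.2)).toFinset \ seen.toFinset).card :=
          Finset.card_pos.mpr ⟨nb, hmemD⟩
        omega
      simp only [List.length_append, List.length_cons, List.length_nil]
      omega

-- one whole level spends as much potential as it discovers
theorem pv_pot_level (adj : List (String × List String)) (F : List String)
    (seen : PySem.Set String) :
    (F.foldl (pvExpandNode adj) (seen, [])).2.length
      + pvPot adj (F.foldl (pvExpandNode adj) (seen, [])).1 ≤ pvPot adj seen := by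
  induction F generalizing seen with
  | nil => simp
  | cons n rest ih =>
    simp only [List.foldl_cons]
    rw [show pvExpandNode adj (seen, []) n
          = ((pvExpandNode adj (seen, []) n).1, [] ++ (pvExpandNode adj (seen, []) n).2) from
        pv_acc_nb _ _ _]
    simp only [List.nil_append]
    rw [pv_acc_level adj rest (pvExpandNode adj (seen, []) n).1 (pvExpandNode adj (seen, []) n).2]
    have h1 : (pvExpandNode adj (seen, []) n).2.length
        + pvPot adj (pvExpandNode adj (seen, []) n).1 ≤ pvPot adj seen :=
      pv_pot_nb adj _ seen (fun x hx => pv_nbs_sub adj n x hx)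
    have h2 := ih (pvExpandNode adj (seen, []) n).1
    simp only [List.length_append]
    omega

-- entries already at the cut-off depth are skipped and the queue drains
theorem pv_walkA_skip (adj : List (String × List String)) (depth : Int) (F : List String) :
    ∀ (fuel : Nat) (seen : PySem.Set String),
    pvWalkA adj depth (fuel + F.length) seen (F.map (fun n => (n, depth))) = seen := by
  induction F with
  | nil => intro fuel seen; simp [pvWalkA]
  | cons n rest ih =>
    intro fuel seen
    have hlen : fuel + (n :: rest).length = (fuel + rest.length) + 1 := by simp; omega
    rw [hlen]
    simp only [List.map_cons, pvWalkA, BEq.rfl, if_true]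
    exact ih fuel seen

-- processing one full level of A's queue = one frontier fold
theorem pv_walkA_level (adj : List (String × List String)) (depth : Int) (d : Int)
    (hd : (d == depth) = false) (F : List String) :
    ∀ (N : List String) (seen : PySem.Set String) (fuel : Nat),
    pvWalkA adj depth (fuel + F.length) seen
        (F.map (fun n => (n, d)) ++ N.map (fun n => (n, d + 1)))
      = pvWalkA adj depth fuel (F.foldl (pvExpandNode adj) (seen, [])).1
          ((N ++ (F.foldl (pvExpandNode adj) (seen, [])).2).map (fun n => (n, d + 1))) := by
  induction F with
  | nil => intro N seen fuel; simp
  | cons n rest ih =>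
    intro N seen fuel
    have hlen : fuel + (n :: rest).length = (fuel + rest.length) + 1 := by simp; omega
    rw [hlen]
    simp only [List.map_cons, List.cons_append, pvWalkA, hd, Bool.false_eq_true, ite_false]
    rw [show pvNbEnqueue seen (rest.map (fun n => (n, d)) ++ N.map (fun n => (n, d + 1)))
            ((PySem.Dict.mk adj).getD n []) d
          = ((pvExpandNode adj (seen, []) n).1,
             (rest.map (fun n => (n, d)) ++ N.map (fun n => (n, d + 1)))
               ++ (pvExpandNode adj (seen, []) n).2.map (fun s => (s, d + 1))) from
        pv_enq_eq _ _ _ _]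
    have hq : (rest.map (fun n => (n, d)) ++ N.map (fun n => (n, d + 1)))
          ++ (pvExpandNode adj (seen, []) n).2.map (fun s => (s, d + 1))
        = rest.map (fun n => (n, d))
          ++ (N ++ (pvExpandNode adj (seen, []) n).2).map (fun n => (n, d + 1)) := by
      simp
    rw [hq, ih (N ++ (pvExpandNode adj (seen, []) n).2) (pvExpandNode adj (seen, []) n).1 fuel]
    simp only [List.foldl_cons]
    rw [show pvExpandNode adj (seen, []) n
          = ((pvExpandNode adj (seen, []) n).1, [] ++ (pvExpandNode adj (seen, []) n).2) from
        pv_acc_nb _ _ _]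
    simp only [List.nil_append]
    rw [pv_acc_level adj rest (pvExpandNode adj (seen, []) n).1 (pvExpandNode adj (seen, []) n).2]
    simp

-- queue BFS with enough fuel = level-synchronous BFS, level by level
theorem pv_walkAB (adj : List (String × List String)) (depth : Int) :
    ∀ (k : Nat) (F : List String) (seen : PySem.Set String) (fuel : Nat),
    pvPot adj seen ≤ fuel →
    pvWalkA adj depth (fuel + F.length) seen (F.map (fun n => (n, depth - (k : Int))))
      = pvWalkB adj k seen F := by
  intro k
  induction k with
  | zero =>
    intro F seen fuel _
    simp only [Nat.cast_zero, sub_zero]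
    rw [pv_walkA_skip adj depth F fuel seen]
    unfold pvWalkB
    split <;> rfl
  | succ k ih =>
    intro F seen fuel hpot
    cases F with
    | nil =>
      simp [pvWalkA, pvWalkB]
    | cons f F' =>
      have hd : ((depth - ((k + 1 : Nat) : Int)) == depth) = false := by
        simp only [beq_eq_false_iff_ne, ne_eq]
        push_cast
        omega
      have hstep := pv_walkA_level adj depth _ hd (f :: F') [] seen fuel
      simp only [List.map_nil, List.append_nil, List.nil_append] at hstep
      rw [hstep]
      have hd1 : depth - ((k + 1 : Nat) : Int) + 1 = depth - (k : Int) := by push_cast; omega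
      rw [hd1]
      have hlvl := pv_pot_level adj (f :: F') seen
      have hfuel : fuel = (fuel - ((f :: F').foldl (pvExpandNode adj) (seen, [])).2.length)
          + ((f :: F').foldl (pvExpandNode adj) (seen, [])).2.length := by omega
      rw [hfuel, ih ((f :: F').foldl (pvExpandNode adj) (seen, [])).2
            ((f :: F').foldl (pvExpandNode adj) (seen, [])).1
            (fuel - ((f :: F').foldl (pvExpandNode adj) (seen, [])).2.length) (by omega)]
      conv_rhs => rw [pvWalkB]
      simp

-- ofList never lengthens a list
theorem pv_ofList_len (xs : List String) : ∀ s : PySem.Set String,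
    (xs.foldl PySem.Set.add s).length ≤ s.length + xs.length := by
  induction xs with
  | nil => intro s; simp
  | cons x rest ih =>
    intro s
    have h1 : (PySem.Set.add s x).length ≤ s.length + 1 := by
      unfold PySem.Set.add; split <;> simp
    have := ih (PySem.Set.add s x)
    simp only [List.foldl_cons, List.length_cons]
    omega

-- the potential is at most the total size of adj's values
theorem pv_pot_le (adj : List (String × List String)) (seen : PySem.Set String) :
    pvPot adj seen ≤ (adj.map (fun p => p.2.length)).sum := by
  unfold pvPot
  calc ((adj.flatMap (fun p => p.2)).toFinset \ seen.toFinset).card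
      ≤ (adj.flatMap (fun p => p.2)).toFinset.card := Finset.card_le_card (Finset.sdiff_subset)
    _ ≤ (adj.flatMap (fun p => p.2)).length := List.toFinset_card_le _
    _ = (adj.map (fun p => p.2.length)).sum := by
        rw [List.length_flatMap]

-- one whole walk of A = the level-synchronous reference, for any shared seen
theorem pv_walkTop (adj : List (String × List String)) (depth : Int) (seed : List String)
    (seen : PySem.Set String) :
    pvWalkTopA adj depth seed seen = pvWalkB adj depth.toNat seen (PySem.Set.ofList seed) := by
  unfold pvWalkTopA
  by_cases hdep : depth ≤ 0
  · rw [if_pos hdep]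
    have h0 : depth.toNat = 0 := Int.toNat_of_nonpos hdep
    rw [h0]
    unfold pvWalkB
    split <;> rfl
  · rw [if_neg hdep]
    have hlen : (PySem.Set.ofList seed).length ≤ seed.length := by
      simpa using pv_ofList_len seed PySem.Set.empty
    have hpotle := pv_pot_le adj seen
    have hfuel : seed.length + (adj.map (fun p => p.2.length)).sum
        = (seed.length + (adj.map (fun p => p.2.length)).sum - (PySem.Set.ofList seed).length)
          + (PySem.Set.ofList seed).length := by omega
    have hzero : (0 : Int) = depth - (depth.toNat : Int) := by
      rw [Int.toNat_of_nonneg (by omega)]; omega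
    rw [hzero, hfuel]
    rw [show (PySem.Set.ofList seed).length
          = ((PySem.Set.ofList seed) : List String).length from rfl]
    exact pv_walkAB adj depth depth.toNat (PySem.Set.ofList seed) seen _ (by omega)

-- ===== B side: round-based rescanning = the level-synchronous reference =====

theorem pv_set_add_not_mem (s : PySem.Set String) (x : String) (h : x ∉ s) :
    PySem.Set.add s x = s ++ [x] := by
  simp [PySem.Set.add, PySem.Set.contains, h]

-- the seen component of the visit fold only grows by exactly the output list
theorem pv_visit_seen (nbs : List String) : ∀ (seen : PySem.Set String),
    (nbs.foldl pvVisit (seen, [])).1 = seen ++ (nbs.foldl pvVisit (seen, [])).2 := by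
  induction nbs with
  | nil => intro seen; simp
  | cons nb rest ih =>
    intro seen
    rw [pv_visit_cons]
    by_cases h : nb ∈ seen
    · rw [if_pos h]; exact ih seen
    · rw [if_neg h, List.nil_append, pv_set_add_not_mem seen nb h]
      rw [pv_acc_nb rest (seen ++ [nb]) [nb]]
      simp [ih (seen ++ [nb])]

theorem pv_level_seen (adj : List (String × List String)) (F : List String) :
    ∀ (seen : PySem.Set String),
    (F.foldl (pvExpandNode adj) (seen, [])).1
      = seen ++ (F.foldl (pvExpandNode adj) (seen, [])).2 := by
  induction F with
  | nil => intro seen; simp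
  | cons n rest ih =>
    intro seen
    simp only [List.foldl_cons]
    rw [show pvExpandNode adj (seen, []) n
          = ((pvExpandNode adj (seen, []) n).1, [] ++ (pvExpandNode adj (seen, []) n).2) from
        pv_acc_nb _ _ _]
    simp only [List.nil_append]
    rw [pv_acc_level adj rest (pvExpandNode adj (seen, []) n).1 (pvExpandNode adj (seen, []) n).2]
    have hV : (pvExpandNode adj (seen, []) n).1
        = seen ++ (pvExpandNode adj (seen, []) n).2 := pv_visit_seen _ seen
    rw [ih (pvExpandNode adj (seen, []) n).1, hV]
    simp

-- inserting a fresh key appends to the item list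
theorem pv_dict_insert_fresh (L : List (String × Int)) (k : String) (v : Int)
    (h : k ∉ L.map Prod.fst) :
    (PySem.Dict.mk L).insert k v = PySem.Dict.mk (L ++ [(k, v)]) := by
  have hc : (PySem.Dict.mk L).contains k = false := by
    rw [PySem.Dict.contains_mk, List.any_eq_false]
    intro p hp he
    exact h (List.mem_map.mpr ⟨p, hp, eq_of_beq he⟩)
  have := PySem.Dict.items_insert_of_not_contains (PySem.Dict.mk L) v hc
  calc (PySem.Dict.mk L).insert k v
      = PySem.Dict.mk (((PySem.Dict.mk L).insert k v).items) := rfl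
    _ = PySem.Dict.mk (L ++ [(k, v)]) := by rw [this]

-- the inner fire fold is the visit fold, stamping discoveries r+1 into the level dict
theorem pv_fire_eq (r : Int) (nbs : List String) :
    ∀ (seen : PySem.Set String) (L : List (String × Int)) (a : Bool),
    (∀ p ∈ L, p.1 ∈ seen) →
    nbs.foldl (pvFire r) (seen, PySem.Dict.mk L, a)
      = ((nbs.foldl pvVisit (seen, [])).1,
         PySem.Dict.mk (L ++ (nbs.foldl pvVisit (seen, [])).2.map (fun s => (s, r + 1))),
         a || !(nbs.foldl pvVisit (seen, [])).2.isEmpty) := by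
  induction nbs with
  | nil => intro seen L a _; simp
  | cons nb rest ih =>
    intro seen L a h
    rw [pv_visit_cons]
    by_cases hm : nb ∈ seen
    · rw [if_pos hm, List.foldl_cons,
        show pvFire r (seen, PySem.Dict.mk L, a) nb = (seen, PySem.Dict.mk L, a) from by
          simp [pvFire, PySem.Set.contains, hm]]
      exact ih seen L a h
    · rw [if_neg hm, List.nil_append, List.foldl_cons]
      have hk : nb ∉ L.map Prod.fst := by
        intro hmem
        obtain ⟨p, hp, he⟩ := List.mem_map.mp hmem
        exact hm (he ▸ h p hp)
      rw [show pvFire r (seen, PySem.Dict.mk L, a) nb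
            = (PySem.Set.add seen nb, PySem.Dict.mk (L ++ [(nb, r + 1)]), true) from by
          simp [pvFire, PySem.Set.contains, hm, pv_dict_insert_fresh L nb (r + 1) hk]]
      rw [pv_acc_nb rest (PySem.Set.add seen nb) [nb]]
      have h' : ∀ p ∈ L ++ [(nb, r + 1)], p.1 ∈ PySem.Set.add seen nb := by
        intro p hp
        rcases List.mem_append.mp hp with hp | hp
        · exact (PySem.Set.mem_add seen nb p.1).mpr (Or.inl (h p hp))
        · simp only [List.mem_singleton] at hp
          rw [hp]
          exact (PySem.Set.mem_add seen nb nb).mpr (Or.inr rfl)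
      rw [ih (PySem.Set.add seen nb) (L ++ [(nb, r + 1)]) true h']
      simp

theorem pv_isEmpty_append (xs ys : List String) :
    (xs ++ ys).isEmpty = (xs.isEmpty && ys.isEmpty) := by
  cases xs <;> simp

-- snapshot entries whose stamp is not the current round are skipped
theorem pv_round_skip (adj : List (String × List String)) (r : Int) (P : List (String × Int)) :
    ∀ (st : PySem.Set String × PySem.Dict String Int × Bool),
    (∀ p ∈ P, p.2 ≠ r) → P.foldl (pvRoundStep adj r) st = st := by
  induction P with
  | nil => intro st _; rfl
  | cons p rest ih =>
    intro st h
    rw [List.foldl_cons,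
      show pvRoundStep adj r st p = st from by
        simp [pvRoundStep, h p List.mem_cons_self]]
    exact ih st (fun q hq => h q (List.mem_cons_of_mem _ hq))

-- the current-round part of the snapshot performs exactly one frontier fold
theorem pv_roundF (adj : List (String × List String)) (r : Int) (F : List String) :
    ∀ (seen : PySem.Set String) (L : List (String × Int)) (a : Bool),
    (∀ p ∈ L, p.1 ∈ seen) →
    (F.map (fun n => (n, r))).foldl (pvRoundStep adj r) (seen, PySem.Dict.mk L, a)
      = ((F.foldl (pvExpandNode adj) (seen, [])).1,
         PySem.Dict.mk (L ++ (F.foldl (pvExpandNode adj) (seen, [])).2.map (fun s => (s, r + 1))),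
         a || !(F.foldl (pvExpandNode adj) (seen, [])).2.isEmpty) := by
  induction F with
  | nil => intro seen L a _; simp
  | cons n rest ih =>
    intro seen L a h
    simp only [List.map_cons, List.foldl_cons]
    rw [show pvRoundStep adj r (seen, PySem.Dict.mk L, a) (n, r)
          = ((PySem.Dict.mk adj).getD n []).foldl (pvFire r) (seen, PySem.Dict.mk L, a) from by
        simp [pvRoundStep]]
    rw [pv_fire_eq r _ seen L a h]
    have hV : ((PySem.Dict.mk adj).getD n []).foldl pvVisit (seen, [])
        = pvExpandNode adj (seen, []) n := rfl
    rw [hV]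
    have hVseen : (pvExpandNode adj (seen, []) n).1
        = seen ++ (pvExpandNode adj (seen, []) n).2 := pv_visit_seen _ seen
    have h' : ∀ p ∈ L ++ (pvExpandNode adj (seen, []) n).2.map (fun s => (s, r + 1)),
        p.1 ∈ (pvExpandNode adj (seen, []) n).1 := by
      intro p hp
      rw [hVseen]
      rcases List.mem_append.mp hp with hp | hp
      · exact List.mem_append_left _ (h p hp)
      · obtain ⟨s, hs, he⟩ := List.mem_map.mp hp
        rw [← he]
        exact List.mem_append_right _ hs
    rw [ih (pvExpandNode adj (seen, []) n).1
          (L ++ (pvExpandNode adj (seen, []) n).2.map (fun s => (s, r + 1)))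
          (a || !(pvExpandNode adj (seen, []) n).2.isEmpty) h']
    rw [show pvExpandNode adj (seen, []) n
          = ((pvExpandNode adj (seen, []) n).1, [] ++ (pvExpandNode adj (seen, []) n).2) from
        pv_acc_nb _ _ _]
    simp only [List.nil_append]
    rw [pv_acc_level adj rest (pvExpandNode adj (seen, []) n).1 (pvExpandNode adj (seen, []) n).2]
    simp [pv_isEmpty_append, Bool.not_and, Bool.or_assoc]

-- one whole round on a level list P ++ F@r (stamps in P off-round)
theorem pv_round_eq (adj : List (String × List String)) (r : Int)
    (P : List (String × Int)) (F : List String) (seen : PySem.Set String)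
    (hP : ∀ p ∈ P, p.2 ≠ r) (hPk : ∀ p ∈ P, p.1 ∈ seen) (hF : ∀ n ∈ F, n ∈ seen) :
    pvRoundC adj r seen (PySem.Dict.mk (P ++ F.map (fun n => (n, r))))
      = ((F.foldl (pvExpandNode adj) (seen, [])).1,
         PySem.Dict.mk ((P ++ F.map (fun n => (n, r)))
            ++ (F.foldl (pvExpandNode adj) (seen, [])).2.map (fun s => (s, r + 1))),
         !(F.foldl (pvExpandNode adj) (seen, [])).2.isEmpty) := by
  unfold pvRoundC
  rw [show (PySem.Dict.mk (P ++ F.map (fun n => (n, r)))).items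
        = P ++ F.map (fun n => (n, r)) from rfl]
  rw [List.foldl_append]
  rw [pv_round_skip adj r P _ hP]
  have hkeys : ∀ p ∈ P ++ F.map (fun n => (n, r)), p.1 ∈ seen := by
    intro p hp
    rcases List.mem_append.mp hp with hp | hp
    · exact hPk p hp
    · obtain ⟨n, hn, he⟩ := List.mem_map.mp hp
      rw [← he]
      exact hF n hn
  rw [pv_roundF adj r F seen (P ++ F.map (fun n => (n, r))) false hkeys]
  simp [List.append_assoc]

theorem pv_walkB_zero (adj : List (String × List String)) (seen : PySem.Set String)
    (F : List String) : pvWalkB adj 0 seen F = seen := by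
  unfold pvWalkB; split <;> rfl

theorem pv_walkB_empty (adj : List (String × List String)) (k : Nat) (seen : PySem.Set String)
    (F : List String) (h : F.isEmpty = true) : pvWalkB adj k seen F = seen := by
  unfold pvWalkB; simp [h]

theorem pv_walkB_step (adj : List (String × List String)) (k : Nat) (seen : PySem.Set String)
    (F : List String) (h : F.isEmpty = false) :
    pvWalkB adj (k + 1) seen F
      = pvWalkB adj k (F.foldl (pvExpandNode adj) (seen, [])).1
          (F.foldl (pvExpandNode adj) (seen, [])).2 := by
  conv_lhs => rw [pvWalkB]
  simp [h]

-- pvWalkB only appends to seen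
theorem pv_walkB_mono (adj : List (String × List String)) :
    ∀ (k : Nat) (seen : PySem.Set String) (F : List String),
    ∃ t, pvWalkB adj k seen F = seen ++ t := by
  intro k
  induction k with
  | zero => intro seen F; exact ⟨[], by rw [pv_walkB_zero]; simp⟩
  | succ k ih =>
    intro seen F
    cases hF : F.isEmpty
    · rw [pv_walkB_step adj k seen F hF]
      obtain ⟨t, ht⟩ := ih (F.foldl (pvExpandNode adj) (seen, [])).1
        (F.foldl (pvExpandNode adj) (seen, [])).2
      refine ⟨(F.foldl (pvExpandNode adj) (seen, [])).2 ++ t, ?_⟩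
      rw [ht, pv_level_seen adj F seen]
      simp
    · exact ⟨[], by rw [pv_walkB_empty adj _ seen F hF]; simp⟩

-- B's while loop = the level-synchronous reference, round by round
theorem pv_walkCB (adj : List (String × List String)) (depth : Int) :
    ∀ (fuel : Nat) (r : Int) (seen : PySem.Set String)
      (P : List (String × Int)) (F : List String),
    (∀ p ∈ P, p.2 < r) → (∀ p ∈ P, p.1 ∈ seen) → (∀ n ∈ F, n ∈ seen) →
    (depth - r).toNat ≤ fuel →
    pvWalkCAux adj depth fuel r seen (PySem.Dict.mk (P ++ F.map (fun n => (n, r))))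
      = pvWalkB adj (depth - r).toNat seen F := by
  intro fuel
  induction fuel with
  | zero =>
    intro r seen P F _ _ _ hle
    have h0 : (depth - r).toNat = 0 := by omega
    rw [h0, pv_walkB_zero]
    rfl
  | succ f ih =>
    intro r seen P F hPlt hPk hF hle
    by_cases hr : r < depth
    · have hP' : ∀ p ∈ P, p.2 ≠ r := fun p hp => ne_of_lt (hPlt p hp)
      simp only [pvWalkCAux]
      rw [if_pos hr]
      rw [pv_round_eq adj r P F seen hP' hPk hF]
      have hBseen : (F.foldl (pvExpandNode adj) (seen, [])).1
          = seen ++ (F.foldl (pvExpandNode adj) (seen, [])).2 := pv_level_seen adj F seen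
      obtain ⟨k, hk⟩ : ∃ k, (depth - r).toNat = k + 1 := ⟨(depth - r).toNat - 1, by omega⟩
      by_cases hB2 : (F.foldl (pvExpandNode adj) (seen, [])).2 = []
      · have hB1 : (F.foldl (pvExpandNode adj) (seen, [])).1 = seen := by
          rw [hBseen, hB2, List.append_nil]
        simp only [hB2, List.isEmpty_nil, Bool.not_true]
        rw [if_neg Bool.false_ne_true]
        rw [hB1]
        cases hFc : F with
        | nil =>
          rw [hk, pv_walkB_empty adj _ seen [] (by simp)]
        | cons x xs =>
          rw [hk, pv_walkB_step adj k seen (x :: xs) (by simp), ← hFc, hB1, hB2,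
            pv_walkB_empty adj k seen [] (by simp)]
      · have hFne : F.isEmpty = false := by
          cases F with
          | nil => simp at hB2
          | cons x xs => simp
        simp only [show (!(F.foldl (pvExpandNode adj) (seen, [])).2.isEmpty) = true from by
          simp [List.isEmpty_eq_false_iff.mpr hB2]]
        simp only [if_true]
        rw [show (P ++ F.map (fun n => (n, r)))
              ++ (F.foldl (pvExpandNode adj) (seen, [])).2.map (fun s => (s, r + 1))
            = (P ++ F.map (fun n => (n, r)))
              ++ ((F.foldl (pvExpandNode adj) (seen, [])).2).map (fun n => (n, r + 1)) from rfl]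
        have hP2 : ∀ p ∈ P ++ F.map (fun n => (n, r)), p.2 < r + 1 := by
          intro p hp
          rcases List.mem_append.mp hp with hp | hp
          · exact lt_trans (hPlt p hp) (by omega)
          · obtain ⟨n, _, he⟩ := List.mem_map.mp hp
            rw [← he]; omega
        have hPk2 : ∀ p ∈ P ++ F.map (fun n => (n, r)),
            p.1 ∈ (F.foldl (pvExpandNode adj) (seen, [])).1 := by
          intro p hp
          rw [hBseen]
          rcases List.mem_append.mp hp with hp | hp
          · exact List.mem_append_left _ (hPk p hp)
          · obtain ⟨n, hn, he⟩ := List.mem_map.mp hp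
            rw [← he]
            exact List.mem_append_left _ (hF n hn)
        have hF2 : ∀ n ∈ (F.foldl (pvExpandNode adj) (seen, [])).2,
            n ∈ (F.foldl (pvExpandNode adj) (seen, [])).1 := by
          intro n hn
          rw [hBseen]
          exact List.mem_append_right _ hn
        have hle2 : (depth - (r + 1)).toNat ≤ f := by omega
        rw [ih (r + 1) (F.foldl (pvExpandNode adj) (seen, [])).1
              (P ++ F.map (fun n => (n, r))) (F.foldl (pvExpandNode adj) (seen, [])).2
              hP2 hPk2 hF2 hle2]
        rw [hk, pv_walkB_step adj k seen F hFne]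
        have : (depth - (r + 1)).toNat = k := by omega
        rw [this]
    · simp only [pvWalkCAux]
      rw [if_neg hr]
      have h0 : (depth - r).toNat = 0 := by omega
      rw [h0, pv_walkB_zero]

-- '{n: 0 for n in seed}' builds the dict of first occurrences stamped 0
theorem pv_seedLevel_aux (xs : List String) : ∀ (S : List String),
    xs.foldl (fun d n => d.insert n 0) (PySem.Dict.mk (S.map (fun n => (n, (0 : Int)))))
      = PySem.Dict.mk ((PySem.Set.update S xs).map (fun n => (n, (0 : Int)))) := by
  induction xs with
  | nil => intro S; simp [PySem.Set.update]
  | cons x rest ih =>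
    intro S
    rw [List.foldl_cons, PySem.Set.update_cons]
    by_cases h : x ∈ S
    · have hc : (PySem.Dict.mk (S.map (fun n => (n, (0 : Int))))).contains x = true := by
        rw [PySem.Dict.contains_mk, List.any_eq_true]
        exact ⟨(x, 0), List.mem_map.mpr ⟨x, h, rfl⟩, by simp⟩
      have hins : (PySem.Dict.mk (S.map (fun n => (n, (0 : Int))))).insert x 0
          = PySem.Dict.mk (S.map (fun n => (n, (0 : Int)))) := by
        calc (PySem.Dict.mk (S.map (fun n => (n, (0 : Int))))).insert x 0
            = PySem.Dict.mk (((PySem.Dict.mk (S.map (fun n => (n, (0 : Int))))).insert x 0).items) := rfl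
          _ = PySem.Dict.mk (S.map (fun n => (n, (0 : Int)))) := by
              rw [PySem.Dict.items_insert_of_contains _ _ hc]
              congr 1
              rw [show (PySem.Dict.mk (S.map (fun n => (n, (0 : Int))))).items
                    = S.map (fun n => (n, (0 : Int))) from rfl]
              rw [List.map_map]
              apply List.map_congr_left
              intro s _
              by_cases hs : s = x
              · simp [hs]
              · simp [Function.comp, hs]
      have hadd : PySem.Set.add S x = S := by
        simp [PySem.Set.add, PySem.Set.contains, h]
      rw [hins, hadd]
      exact ih S
    · have hk : x ∉ (S.map (fun n => (n, (0 : Int)))).map Prod.fst := by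
        simp [h]
      rw [pv_dict_insert_fresh _ x 0 hk]
      rw [show S.map (fun n => (n, (0 : Int))) ++ [(x, (0 : Int))]
            = (S ++ [x]).map (fun n => (n, (0 : Int))) from by simp]
      rw [pv_set_add_not_mem S x h]
      exact ih (S ++ [x])

theorem pv_seedLevel (seed : List String) :
    pvSeedLevel seed
      = PySem.Dict.mk ((PySem.Set.ofList seed).map (fun n => (n, (0 : Int)))) := by
  have h := pv_seedLevel_aux seed []
  simp only [List.map_nil, PySem.Set.update_nil_left] at h
  exact h

-- one whole walk of B = the level-synchronous reference, for any seen containing the seeds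
theorem pv_walkTopC (adj : List (String × List String)) (depth : Int) (seed : List String)
    (seen : PySem.Set String) (h : ∀ n ∈ PySem.Set.ofList seed, n ∈ seen) :
    pvWalkCAux adj depth depth.toNat 0 seen (pvSeedLevel seed)
      = pvWalkB adj depth.toNat seen (PySem.Set.ofList seed) := by
  rw [pv_seedLevel]
  have hw := pv_walkCB adj depth depth.toNat 0 seen [] (PySem.Set.ofList seed)
    (by intro p hp; simp at hp) (by intro p hp; simp at hp) h (by omega)
  simp only [List.nil_append, sub_zero] at hw
  exact hw

-- ===== VERDICT (by name: the statement is the Claim_ definition above) =====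
theorem expand_directional_spec : Claim_equal_expand_directional := by
  intro seed out_adj in_adj outbound inbound _
  unfold Spec_expand_directional expand_directional expand_directional_alt
  show pvWalkTopA in_adj inbound seed (pvWalkTopA out_adj outbound seed (PySem.Set.ofList seed))
      = pvWalkCAux in_adj inbound inbound.toNat 0
          (pvWalkCAux out_adj outbound outbound.toNat 0 (PySem.Set.ofList seed) (pvSeedLevel seed))
          (pvSeedLevel seed)
  rw [pv_walkTopC out_adj outbound seed (PySem.Set.ofList seed) (fun n hn => hn)]
  have hmem : ∀ n ∈ PySem.Set.ofList seed,
      n ∈ pvWalkB out_adj outbound.toNat (PySem.Set.ofList seed) (PySem.Set.ofList seed) := by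
    obtain ⟨t, ht⟩ := pv_walkB_mono out_adj outbound.toNat (PySem.Set.ofList seed)
      (PySem.Set.ofList seed)
    rw [ht]
    intro n hn
    exact List.mem_append_left _ hn
  rw [pv_walkTopC in_adj inbound seed _ hmem]
  rw [pv_walkTop out_adj outbound seed (PySem.Set.ofList seed)]
  rw [pv_walkTop in_adj inbound seed _]
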